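-- pv_equiv track=rewrite | github.com/wogkr810/coding-test | 프로그래머스/2/148653. 마법의 엘리베이터/마법의 엘리베이터.py | solution
-- ===== SOURCE A (Python) =====
-- def solution(storey):
--     cnt = 0
--     start = 10
--
--     if storey <= 9:
--         if 0 <= storey <= 5:
--             return storey
--         else:
--             return 11-storey
--
--     while True:
--         storey, q = divmod(storey,start)
--         if 0 <= q <5:
--             cnt += q
--         elif q == 5:
--             if int(str(storey)[-1]) >= 5:
--                 storey += 1
--             cnt += q
--         else:
--             cnt += (10-q)
--             storey += 1
--
--         if storey == 0:
--             break
--     return cnt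
-- ===== SOURCE B (Python) =====
-- def solution(storey):
--     if storey <= 9:
--         return storey if 0 <= storey <= 5 else 11 - storey
--     q, r = divmod(storey, 10)
--     if r < 5:
--         return r + solution(q)
--     return min(r + solution(q), (10 - r) + solution(q + 1))
-- ===== Notes on version B (the rewrite author's own statement) =====
-- stated objective: alternative
-- what changed: Replaces A's iterative while-loop greedy (explicit carry bookkeeping and a string-indexing peek at the next digit to break the r==5 tie) with a recursive digit DP that splits divmod(n,10) and lets min choose between rounding the digit down and rounding up with a carry.
import Mathlib
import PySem

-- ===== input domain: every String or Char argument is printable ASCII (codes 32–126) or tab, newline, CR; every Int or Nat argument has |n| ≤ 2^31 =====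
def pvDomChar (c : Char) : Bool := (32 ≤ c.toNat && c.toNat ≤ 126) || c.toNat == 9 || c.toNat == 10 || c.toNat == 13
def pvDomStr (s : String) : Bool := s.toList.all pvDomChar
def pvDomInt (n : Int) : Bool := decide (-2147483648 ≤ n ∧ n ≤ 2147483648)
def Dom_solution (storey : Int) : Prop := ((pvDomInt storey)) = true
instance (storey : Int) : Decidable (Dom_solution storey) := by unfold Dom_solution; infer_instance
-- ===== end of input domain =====

-- B replaces A's while-loop greedy (carry bookkeeping + string peek at the next digit for the r==5 tie)
-- with a recursive digit DP where `min` picks between rounding the digit down and up; alternative, not faster.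


-- ===== PORT A =====
-- int(str(storey)[-1]) : last character of str(storey) read back as an int.
-- A only evaluates this with storey ≥ 0, where neither Option is ever none; the 0 defaults are unreachable guards.
def pvLastDigit (s : Int) : Int :=
  match PySem.List.pyGet? (PySem.Int.toChars s) (-1) with
  | some c => (PySem.Int.ofChars? [c]).getD 0
  | none => 0

-- termination facts for the ports (cited in decreasing_by)
lemma pv_dec_down (s : Int) (h : ¬ s ≤ 0) : (PySem.Int.floordiv s 10).toNat < s.toNat := by
  have h1 : PySem.Int.floordiv s 10 = s / 10 := PySem.Int.floordiv_eq_ediv_of_pos (by norm_num)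
  omega

lemma pv_dec_up (s : Int) (h : 5 ≤ s) : (PySem.Int.floordiv s 10 + 1).toNat < s.toNat := by
  have h1 : PySem.Int.floordiv s 10 = s / 10 := PySem.Int.floordiv_eq_ediv_of_pos (by norm_num)
  omega

lemma pv_mod5_ge (s : Int) (h : ¬ s ≤ 0) (hq : 5 ≤ PySem.Int.mod s 10) : 5 ≤ s := by
  have h1 : PySem.Int.mod s 10 = s % 10 := PySem.Int.mod_eq_emod_of_pos (by norm_num)
  omega

-- the `while True` loop of A; the `¬ storey ≤ 0` guard only makes the recursion total
-- (the loop is entered with storey ≥ 10 and its state stays ≥ 1 until the break)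
def solutionLoop (storey cnt : Int) : Int :=
  if hs : storey ≤ 0 then cnt
  else
    let t := PySem.Int.floordiv storey 10
    let q := PySem.Int.mod storey 10
    if 0 ≤ q ∧ q < 5 then
      if t = 0 then cnt + q else solutionLoop t (cnt + q)
    else if hq5 : q = 5 then
      let t' := if 5 ≤ pvLastDigit t then t + 1 else t
      if t' = 0 then cnt + q else solutionLoop t' (cnt + q)
    else
      if t + 1 = 0 then cnt + (10 - q) else solutionLoop (t + 1) (cnt + (10 - q))
termination_by storey.toNat
decreasing_by
  · exact pv_dec_down storey hs
  · split
    · exact pv_dec_up storey (pv_mod5_ge storey hs (by simp only [q] at hq5; omega))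
    · exact pv_dec_down storey hs
  · refine pv_dec_up storey (pv_mod5_ge storey hs ?_)
    have h0 : 0 ≤ PySem.Int.mod storey 10 := PySem.Int.mod_nonneg storey (by norm_num)
    simp only [q] at *; omega

def solution (storey : Int) : Int :=
  if storey ≤ 9 then
    if 0 ≤ storey ∧ storey ≤ 5 then storey else 11 - storey
  else solutionLoop storey 0

-- ===== PORT B =====
def solution_alt (storey : Int) : Int :=
  if storey ≤ 9 then
    if 0 ≤ storey ∧ storey ≤ 5 then storey else 11 - storey
  else
    let q := PySem.Int.floordiv storey 10
    let r := PySem.Int.mod storey 10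
    if r < 5 then r + solution_alt q
    else min (r + solution_alt q) ((10 - r) + solution_alt (q + 1))
termination_by storey.toNat
decreasing_by
  · exact pv_dec_down storey (by omega)
  · exact pv_dec_down storey (by omega)
  · exact pv_dec_up storey (by omega)

-- ===== PRECONDITION & SPEC =====
def Spec_solution (storey : Int) (out : Int) : Prop := out = solution_alt storey
instance (storey : Int) (out : Int) : Decidable (Spec_solution storey out) := by unfold Spec_solution; infer_instance

-- ===== CLAIM (what is proved, stated in full; the proofs are below) =====
def Claim_equal_solution : Prop := ∀ (storey : Int), Dom_solution storey → Spec_solution storey (solution storey)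

-- ===== LEMMAS AND PROOFS =====

lemma alt_base (n : Int) (h : n ≤ 9) :
    solution_alt n = if 0 ≤ n ∧ n ≤ 5 then n else 11 - n := by
  rw [solution_alt, if_pos h]

lemma alt_step (n : Int) (h : 10 ≤ n) :
    solution_alt n =
      if n % 10 < 5 then n % 10 + solution_alt (n / 10)
      else min (n % 10 + solution_alt (n / 10)) ((10 - n % 10) + solution_alt (n / 10 + 1)) := by
  rw [solution_alt, if_neg (by omega)]
  simp only [PySem.Int.floordiv_eq_ediv_of_pos (b := 10) (by norm_num),
    PySem.Int.mod_eq_emod_of_pos (b := 10) (by norm_num)]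

-- the neighbour invariant of B: consecutive values differ by at most 1,
-- and the direction of the tie at a trailing 5 is decided by the last digit
lemma alt_key (k : Nat) :
    solution_alt ((k : Int) + 1) ≤ solution_alt (k : Int) + 1 ∧
    solution_alt (k : Int) ≤ solution_alt ((k : Int) + 1) + 1 ∧
    (5 ≤ (k : Int) % 10 → solution_alt ((k : Int) + 1) ≤ solution_alt (k : Int)) ∧
    ((k : Int) % 10 < 5 → solution_alt (k : Int) ≤ solution_alt ((k : Int) + 1)) := by
  induction k using Nat.strong_induction_on with
  | _ k ih =>
  by_cases hk : k < 10
  · have hb : ∀ m : Int, 0 ≤ m → m ≤ 9 → solution_alt m = if m ≤ 5 then m else 11 - m := by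
      intro m h1 h2; rw [alt_base m h2]; split_ifs <;> omega
    have h10 : solution_alt 10 = 1 := by
      rw [alt_step 10 (by norm_num)]
      norm_num [hb 1 (by norm_num) (by norm_num)]
    interval_cases k <;> push_cast <;> norm_num [hb, h10]
  · obtain ⟨t, d, hd, rfl⟩ : ∃ t d, d < 10 ∧ k = 10 * t + d :=
      ⟨k / 10, k % 10, by omega, by omega⟩
    have ht : 1 ≤ t := by omega
    obtain ⟨iha, ihb, ihc, ihd⟩ := ih t (by omega)
    have hs1 : (10 : Int) ≤ ((10 * t + d : Nat) : Int) := by push_cast; omega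
    have hs2 : (10 : Int) ≤ ((10 * t + d : Nat) : Int) + 1 := by omega
    rw [alt_step _ hs1, alt_step _ hs2]
    have em : ((10 * t + d : Nat) : Int) % 10 = (d : Int) := by push_cast; omega
    have ed : ((10 * t + d : Nat) : Int) / 10 = (t : Int) := by push_cast; omega
    by_cases h9 : d = 9
    · subst h9
      have em2 : (((10 * t + 9 : Nat) : Int) + 1) % 10 = 0 := by push_cast; omega
      have ed2 : (((10 * t + 9 : Nat) : Int) + 1) / 10 = (t : Int) + 1 := by push_cast; omega
      rw [em, em2, ed, ed2]
      norm_num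
      omega
    · have em2 : (((10 * t + d : Nat) : Int) + 1) % 10 = (d : Int) + 1 := by push_cast; omega
      have ed2 : (((10 * t + d : Nat) : Int) + 1) / 10 = (t : Int) := by push_cast; omega
      rw [em, em2, ed, ed2]
      interval_cases d <;> simp_all <;> omega

lemma toDigitsCore_append (fuel n : Nat) (ds : List Char) :
    Nat.toDigitsCore 10 fuel n ds = Nat.toDigitsCore 10 fuel n [] ++ ds := by
  induction fuel generalizing n ds with
  | zero => simp [Nat.toDigitsCore]
  | succ f ih =>
    simp only [Nat.toDigitsCore]
    split
    · simp
    · rw [ih (n / 10) ((n % 10).digitChar :: ds), ih (n / 10) [(n % 10).digitChar],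
        List.append_assoc]
      simp

lemma toDigits_getLast? (m : Nat) :
    (Nat.toDigits 10 m).getLast? = some (Nat.digitChar (m % 10)) := by
  unfold Nat.toDigits
  rcases m with _ | m
  · decide
  · simp only [Nat.toDigitsCore]
    split
    · simp
    · rw [toDigitsCore_append]
      split <;> simp

lemma digit_ofChars (r : Nat) (h : r < 10) :
    PySem.Int.ofChars? [Nat.digitChar r] = some (r : Int) := by
  interval_cases r <;> decide

lemma lastDigit_eq (s : Int) (hs : 0 ≤ s) : pvLastDigit s = s % 10 := by
  unfold pvLastDigit
  rw [PySem.List.pyGet?_neg_one]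
  have ht : PySem.Int.toChars s = Nat.toDigits 10 s.toNat := by
    unfold PySem.Int.toChars; rw [if_neg (by omega)]
  rw [ht, toDigits_getLast?]
  simp only [digit_ofChars (s.toNat % 10) (by omega), Option.getD_some]
  omega

lemma alt_small (m : Int) (h1 : 0 ≤ m) (h2 : m ≤ 9) :
    solution_alt m = if m ≤ 5 then m else 11 - m := by
  rw [alt_base m h2]; split_ifs <;> omega

lemma loop_unfold (s c : Int) (h : 0 < s) :
    solutionLoop s c =
      if 0 ≤ s % 10 ∧ s % 10 < 5 then
        if s / 10 = 0 then c + s % 10 else solutionLoop (s / 10) (c + s % 10)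
      else if _hq : s % 10 = 5 then
        if (if 5 ≤ pvLastDigit (s / 10) then s / 10 + 1 else s / 10) = 0 then c + s % 10
        else solutionLoop (if 5 ≤ pvLastDigit (s / 10) then s / 10 + 1 else s / 10) (c + s % 10)
      else
        if s / 10 + 1 = 0 then c + (10 - s % 10)
        else solutionLoop (s / 10 + 1) (c + (10 - s % 10)) := by
  rw [solutionLoop, dif_neg (by omega)]
  simp only [PySem.Int.floordiv_eq_ediv_of_pos (b := 10) (by norm_num),
    PySem.Int.mod_eq_emod_of_pos (b := 10) (by norm_num)]

lemma loop_eq (k : Nat) (hk : 1 ≤ k) (c : Int) :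
    solutionLoop (k : Int) c = c + solution_alt (k : Int) := by
  induction k using Nat.strong_induction_on generalizing c with
  | _ k ih =>
  obtain ⟨t, d, hd, rfl⟩ : ∃ t d, d < 10 ∧ k = 10 * t + d :=
    ⟨k / 10, k % 10, by omega, by omega⟩
  rw [loop_unfold _ c (by push_cast; omega)]
  have em : ((10 * t + d : Nat) : Int) % 10 = (d : Int) := by push_cast; omega
  have ed : ((10 * t + d : Nat) : Int) / 10 = (t : Int) := by push_cast; omega
  have e1 : ((t : Nat) : Int) + 1 = (((t + 1 : Nat)) : Int) := by push_cast; ring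
  rw [em, ed]
  obtain ⟨iha, _, ihc, ihd⟩ := alt_key t
  by_cases hd5 : d < 5
  · rw [if_pos ⟨by omega, by omega⟩]
    by_cases ht0 : t = 0
    · subst ht0
      rw [if_pos (by norm_num)]
      rw [alt_small (((10 * 0 + d : Nat)) : Int) (by push_cast; omega) (by push_cast; omega)]
      rw [if_pos (by push_cast; omega)]
      push_cast; omega
    · rw [if_neg (by omega), ih t (by omega) (by omega) (c + (d : Int))]
      rw [alt_step (((10 * t + d : Nat)) : Int) (by push_cast; omega), em, ed,
        if_pos (by omega)]
      omega
  · by_cases hd6 : d = 5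
    · subst hd6
      rw [if_neg (by omega), dif_pos (show ((5:Nat):Int) = 5 by norm_num), lastDigit_eq _ (by omega),
        show ((5:Nat):Int) = 5 by norm_num]
      by_cases h5 : 5 ≤ (t : Int) % 10
      · rw [if_pos h5, if_neg (by omega), e1, ih (t + 1) (by omega) (by omega) (c + 5)]
        rw [alt_step (((10 * t + 5 : Nat)) : Int) (by push_cast; omega), em, ed,
          if_neg (by omega)]
        have h2 := ihc h5
        push_cast at *
        omega
      · rw [if_neg h5]
        by_cases ht0 : t = 0
        · subst ht0
          have hA : solution_alt (((10 * 0 + 5 : Nat)) : Int) = 5 := by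
            have g1 : (0 : Int) ≤ (((10 * 0 + 5 : Nat)) : Int) := by norm_num
            have g2 : (((10 * 0 + 5 : Nat)) : Int) ≤ 9 := by norm_num
            rw [alt_small (((10 * 0 + 5 : Nat)) : Int) g1 g2]
            norm_num
          rw [if_pos (by norm_num), hA]
        · rw [if_neg (by omega), ih t (by omega) (by omega) (c + 5)]
          rw [alt_step (((10 * t + 5 : Nat)) : Int) (by push_cast; omega), em, ed,
            if_neg (by omega)]
          have h2 := ihd (by omega)
          omega
    · rw [if_neg (by omega), dif_neg (by omega), if_neg (by omega)]
      rw [e1, ih (t + 1) (by omega) (by omega) (c + (10 - (d : Int)))]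
      by_cases ht0 : t = 0
      · subst ht0
        have hA : solution_alt (((10 * 0 + d : Nat)) : Int) = 11 - (d : Int) := by
          have g1 : (0 : Int) ≤ (((10 * 0 + d : Nat)) : Int) := by push_cast; omega
          have g2 : (((10 * 0 + d : Nat)) : Int) ≤ 9 := by push_cast; omega
          have g3 : ¬ (((10 * 0 + d : Nat)) : Int) ≤ 5 := by push_cast; omega
          rw [alt_small (((10 * 0 + d : Nat)) : Int) g1 g2, if_neg g3]
          push_cast
          ring_nf
        have hB : solution_alt (((0 + 1 : Nat)) : Int) = 1 := by
          have g1 : (0 : Int) ≤ (((0 + 1 : Nat)) : Int) := by norm_num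
          have g2 : (((0 + 1 : Nat)) : Int) ≤ 9 := by norm_num
          rw [alt_small (((0 + 1 : Nat)) : Int) g1 g2]
          norm_num
        rw [hA, hB]
        omega
      · rw [alt_step (((10 * t + d : Nat)) : Int) (by push_cast; omega), em, ed,
          if_neg (by omega)]
        have e2 : (((t + 1 : Nat)) : Int) = ((t : Nat) : Int) + 1 := by push_cast; ring
        rw [e2]
        omega

-- ===== VERDICT (by name: the statement is the Claim_ definition above) =====
theorem solution_spec : Claim_equal_solution := by
  intro storey _
  unfold Spec_solution solution
  by_cases h : storey ≤ 9
  · rw [if_pos h, alt_base storey h]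
  · rw [if_neg h]
    have hs : storey = ((storey.toNat : Int)) := by omega
    rw [hs, loop_eq storey.toNat (by omega) 0, zero_add]
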